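-- pv_equiv track=rewrite | github.com/Cody-ai-png/Request-Metadata-Analyzer | ip_tracker.py | is_crawler
-- ===== SOURCE A (Python) =====
-- def is_crawler(user_agent):
--     """Determine if a user agent is a crawler/bot"""
--     # List of common crawler identifiers
--     crawler_identifiers = [
--         'bot', 'crawler', 'spider', 'slurp', 'baiduspider',
--         'yandex', 'facebookexternalhit', 'linkedinbot', 'twitterbot',
--         'slackbot', 'telegrambot', 'whatsapp', 'ahrefsbot',
--         'semrushbot', 'pingdom', 'googlebot', 'bingbot',
--         'duckduckbot', 'yahoo', 'mj12bot', 'yeti',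
--         'screaming frog', 'sitechecker', 'datanyze'
--     ]
--
--     # Check if user agent contains any crawler identifier
--     user_agent_lower = user_agent.lower()
--     for identifier in crawler_identifiers:
--         if identifier in user_agent_lower:
--             return True
--
--     return False
-- ===== SOURCE B (Python) =====
-- import re
--
-- # One compiled pattern alternating all crawler identifiers.
-- CRAWLER_RE = re.compile('|'.join(map(re.escape, (
--     'bot', 'crawler', 'spider', 'slurp', 'baiduspider',
--     'yandex', 'facebookexternalhit', 'linkedinbot', 'twitterbot',
--     'slackbot', 'telegrambot', 'whatsapp', 'ahrefsbot',
--     'semrushbot', 'pingdom', 'googlebot', 'bingbot',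
--     'duckduckbot', 'yahoo', 'mj12bot', 'yeti',
--     'screaming frog', 'sitechecker', 'datanyze'
-- ))))
--
-- def is_crawler(user_agent):
--     """Determine if a user agent is a crawler/bot"""
--     return bool(CRAWLER_RE.search(user_agent.lower()))
-- ===== Notes on version B (the rewrite author's own statement) =====
-- stated objective: idiomatic
-- what changed: A runs a separate substring-containment scan over the string for each of the 24 identifiers; B compiles one regular expression alternating all identifiers and makes a single re.search pass over the lowercased string.
import Mathlib
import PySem

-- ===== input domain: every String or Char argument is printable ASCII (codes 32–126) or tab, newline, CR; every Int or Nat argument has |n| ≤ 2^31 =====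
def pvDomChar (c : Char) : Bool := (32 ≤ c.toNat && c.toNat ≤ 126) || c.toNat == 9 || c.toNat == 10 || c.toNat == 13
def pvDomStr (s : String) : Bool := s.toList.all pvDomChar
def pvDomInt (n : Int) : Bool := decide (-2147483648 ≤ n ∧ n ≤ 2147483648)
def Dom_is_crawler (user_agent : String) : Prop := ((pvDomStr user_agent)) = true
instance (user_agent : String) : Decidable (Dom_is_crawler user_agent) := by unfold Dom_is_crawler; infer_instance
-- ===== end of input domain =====

-- B replaces A's 24 separate substring-containment scans by one regex search with an
-- alternation of all identifiers over the lowercased string; objective: idiomatic.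

-- ===== PORT A =====
-- the local identifier list of A
def crawlerIdentifiers : List String :=
  ["bot", "crawler", "spider", "slurp", "baiduspider", "yandex", "facebookexternalhit",
   "linkedinbot", "twitterbot", "slackbot", "telegrambot", "whatsapp", "ahrefsbot",
   "semrushbot", "pingdom", "googlebot", "bingbot", "duckduckbot", "yahoo", "mj12bot",
   "yeti", "screaming frog", "sitechecker", "datanyze"]

-- A's loop: for each identifier in order, return True on the first 'identifier in ua'
def crawlerLoopA (ids : List String) (ua : String) : Bool :=
  match ids with
  | [] => false
  | id :: rest => if PySem.Str.isIn id ua then true else crawlerLoopA rest ua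

def is_crawler (user_agent : String) : Bool :=
  crawlerLoopA crawlerIdentifiers (PySem.Str.lower user_agent)

-- ===== PORT B =====
-- Hand port of re.search on an alternation of literal strings (PySem has no regex):
-- at one start position the engine tries each alternative branch in order …
def reTryAlts (alts : List String) (s : List Char) : Bool :=
  alts.any (fun alt => PySem.Chars.startswith s alt.toList)

-- … and re.search tries successive start positions left to right until a match.
def reSearchAlts (alts : List String) (s : List Char) : Bool :=
  match s with
  | [] => reTryAlts alts []
  | _ :: t => reTryAlts alts s || reSearchAlts alts t

def is_crawler_alt (user_agent : String) : Bool :=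
  reSearchAlts crawlerIdentifiers (PySem.Str.lower user_agent).toList

-- ===== PRECONDITION & SPEC =====
def Spec_is_crawler (user_agent : String) (out : Bool) : Prop := out = is_crawler_alt user_agent
instance (user_agent : String) (out : Bool) : Decidable (Spec_is_crawler user_agent out) := by unfold Spec_is_crawler; infer_instance

-- ===== CLAIM (what is proved, stated in full; the proofs are below) =====
def Claim_equal_is_crawler : Prop := ∀ (user_agent : String), Dom_is_crawler user_agent → Spec_is_crawler user_agent (is_crawler user_agent)

-- ===== LEMMAS AND PROOFS =====

-- A's loop is true iff some identifier is an infix of ua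
theorem crawlerLoopA_iff (ids : List String) (ua : String) :
    crawlerLoopA ids ua = true ↔ ∃ id ∈ ids, id.toList <:+: ua.toList := by
  induction ids with
  | nil => simp [crawlerLoopA]
  | cons id rest ih =>
    simp only [crawlerLoopA]
    split_ifs with h
    · simp only [true_iff]
      exact ⟨id, List.mem_cons_self, (PySem.Str.isIn_iff_infix id ua).mp h⟩
    · rw [ih]
      constructor
      · rintro ⟨i, hi, hinf⟩; exact ⟨i, List.mem_cons_of_mem _ hi, hinf⟩
      · rintro ⟨i, hi, hinf⟩
        rcases List.mem_cons.mp hi with rfl | hi'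
        · exact absurd ((PySem.Str.isIn_iff_infix i ua).mpr hinf) h
        · exact ⟨i, hi', hinf⟩

-- B's search is true iff some alternative is a prefix of some suffix
theorem reSearchAlts_iff (alts : List String) (s : List Char) :
    reSearchAlts alts s = true ↔ ∃ id ∈ alts, ∃ j, id.toList <+: s.drop j := by
  induction s with
  | nil =>
    simp only [reSearchAlts, reTryAlts, List.any_eq_true]
    constructor
    · rintro ⟨id, hid, h⟩
      exact ⟨id, hid, 0, (PySem.Chars.startswith_iff _ _).mp h⟩
    · rintro ⟨id, hid, j, h⟩
      exact ⟨id, hid, (PySem.Chars.startswith_iff _ _).mpr (by simpa using h)⟩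
  | cons a t ih =>
    simp only [reSearchAlts, Bool.or_eq_true, ih, reTryAlts, List.any_eq_true]
    constructor
    · rintro (⟨id, hid, h⟩ | ⟨id, hid, j, h⟩)
      · exact ⟨id, hid, 0, (PySem.Chars.startswith_iff _ _).mp h⟩
      · exact ⟨id, hid, j + 1, by simpa using h⟩
    · rintro ⟨id, hid, j, h⟩
      cases j with
      | zero => exact Or.inl ⟨id, hid, (PySem.Chars.startswith_iff _ _).mpr (by simpa using h)⟩
      | succ j' => exact Or.inr ⟨id, hid, j', by simpa using h⟩

-- ===== VERDICT (by name: the statement is the Claim_ definition above) =====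
theorem is_crawler_spec : Claim_equal_is_crawler := by
  intro ua _
  show is_crawler ua = is_crawler_alt ua
  rw [Bool.eq_iff_iff, is_crawler, is_crawler_alt, crawlerLoopA_iff, reSearchAlts_iff]
  constructor
  · rintro ⟨id, hid, hinf⟩
    rcases (List.infix_iff_prefix_suffix.mp hinf) with ⟨u, hpre, hsuf⟩
    exact ⟨id, hid, _, (List.suffix_iff_eq_drop.mp hsuf) ▸ hpre⟩
  · rintro ⟨id, hid, j, hpre⟩
    exact ⟨id, hid, hpre.isInfix.trans (List.drop_suffix j _).isInfix⟩
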